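-- pv_equiv track=rewrite | github.com/mohos26/Challenges | Burglary Series (23)_ Find and Remove.py | find_and_remove
-- ===== SOURCE A (Python) =====
-- def find_and_remove(dct):
--     lst = []
--     for main_key in dct.keys():
--         for key, value in dct[main_key].items():
--             if value.isdigit():
--                 dct[main_key][key] = int(value)
--             else:
--                 lst.append([main_key, key])
--     for main_key, key in lst:
--         dct[main_key].pop(key)
--     return dct
-- ===== SOURCE B (Python) =====
-- def find_and_remove(dct):
--     # One-pass reconstruction: rebuild each inner dict by a comprehension that
--     # keeps only digit-string values (converted to int); no removal list, no pops.
--     # (A mutates dct in place; B builds a fresh dict -- return values agree.)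
--     return {mk: {k: int(v) for k, v in inner.items() if v.isdigit()}
--             for mk, inner in dct.items()}
-- ===== Notes on version B (the rewrite author's own statement) =====
-- stated objective: simpler
-- what changed: Replaces A's two-phase in-place mutation (convert digit values in place while collecting [main_key, key] pairs of bad entries into a list, then a second pass popping each collected key) with a single nested dict comprehension that rebuilds each inner dict, keeping only entries whose value .isdigit() mapped to int; no removal list, no pops, no mutation of the argument.
import Mathlib
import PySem

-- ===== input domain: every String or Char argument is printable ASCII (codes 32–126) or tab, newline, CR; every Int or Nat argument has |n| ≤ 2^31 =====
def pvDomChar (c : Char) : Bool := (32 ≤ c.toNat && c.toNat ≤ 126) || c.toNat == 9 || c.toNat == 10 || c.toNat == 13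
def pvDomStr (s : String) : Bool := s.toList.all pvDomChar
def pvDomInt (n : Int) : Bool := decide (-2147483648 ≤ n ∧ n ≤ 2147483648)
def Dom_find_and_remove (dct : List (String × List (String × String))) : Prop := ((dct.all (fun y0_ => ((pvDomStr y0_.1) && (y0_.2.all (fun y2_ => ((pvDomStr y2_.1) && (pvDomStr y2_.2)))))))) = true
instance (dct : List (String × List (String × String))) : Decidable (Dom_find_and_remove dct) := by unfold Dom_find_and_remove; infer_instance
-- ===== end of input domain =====

-- B rebuilds each inner dict with one filtering comprehension instead of A's two-phase
-- convert-in-place-then-pop; A mutates its argument, B does not — the claim is about return values.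

-- shared helpers: int(v) on a digit string, and the list→dict marshalling of the argument
def pvToInt (s : String) : Int := (PySem.Int.ofStr? s).getD 0

def pvMarshal (dct : List (String × List (String × String))) :
    PySem.Dict String (PySem.Dict String String) :=
  PySem.Dict.ofList (dct.map (fun p => (p.1, PySem.Dict.ofList p.2)))

-- ===== PORT A =====
-- inner dicts start with all-string values; some become ints: values are String ⊕ Int
def pvInner (w : PySem.Dict String String) : PySem.Dict String (String ⊕ Int) :=
  PySem.Dict.mk (w.items.map (fun q => (q.1, Sum.inl q.2)))

-- body of the inner loop: 'if value.isdigit(): dct[main_key][key] = int(value) else: lst.append([main_key, key])'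
def pvStep2 (mk : String)
    (st : PySem.Dict String (PySem.Dict String (String ⊕ Int)) × List (String × String))
    (q : String × (String ⊕ Int)) :
    PySem.Dict String (PySem.Dict String (String ⊕ Int)) × List (String × String) :=
  match q.2 with
  | Sum.inl v =>
      if PySem.Str.strIsdigit v then
        (st.1.insert mk ((st.1.getD mk PySem.Dict.empty).insert q.1 (Sum.inr (pvToInt v))), st.2)
      else (st.1, st.2 ++ [(mk, q.1)])
  | Sum.inr _ => st   -- unreachable: every value is still a string when its pair is visited

-- body of the outer loop: 'for key, value in dct[main_key].items(): …'
def pvStep1 (st : PySem.Dict String (PySem.Dict String (String ⊕ Int)) × List (String × String))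
    (mk : String) :
    PySem.Dict String (PySem.Dict String (String ⊕ Int)) × List (String × String) :=
  ((st.1.getD mk PySem.Dict.empty).items).foldl (pvStep2 mk) st

-- 'dct[main_key].pop(key)' (the key is always present, so pop = erase written back)
def pvPop (d : PySem.Dict String (PySem.Dict String (String ⊕ Int))) (p : String × String) :
    PySem.Dict String (PySem.Dict String (String ⊕ Int)) :=
  d.insert p.1 ((d.getD p.1 PySem.Dict.empty).erase p.2)

def find_and_remove (dct : List (String × List (String × String))) :
    List (String × List (String × Int)) :=
  let d0 := pvMarshal dct
  let dA := PySem.Dict.mk (d0.items.map (fun p => (p.1, pvInner p.2)))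
  -- lst = []; for main_key in dct.keys(): for key, value in dct[main_key].items(): …
  let st := dA.keys.foldl pvStep1 (dA, ([] : List (String × String)))
  -- for main_key, key in lst: dct[main_key].pop(key)
  let d2 := st.2.foldl pvPop st.1
  -- unmarshal: every remaining value is an int
  d2.items.map (fun p => (p.1, p.2.items.map (fun q => (q.1, (q.2.getRight?).getD 0))))

-- ===== PORT B =====
-- {mk: {k: int(v) for k, v in inner.items() if v.isdigit()} for mk, inner in dct.items()}
-- (the comprehensions' keys are distinct keys of existing dicts, so each built dict's items
--  are exactly the filtered pair list)
def find_and_remove_alt (dct : List (String × List (String × String))) :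
    List (String × List (String × Int)) :=
  (pvMarshal dct).items.map (fun p =>
    (p.1, p.2.items.filterMap (fun q =>
      if PySem.Str.strIsdigit q.2 then some (q.1, pvToInt q.2) else none)))

-- ===== PRECONDITION & SPEC =====
def Spec_find_and_remove (dct : List (String × List (String × String))) (out : List (String × List (String × Int))) : Prop := out = find_and_remove_alt dct
instance (dct : List (String × List (String × String))) (out : List (String × List (String × Int))) : Decidable (Spec_find_and_remove dct out) := by unfold Spec_find_and_remove; infer_instance

-- ===== CLAIM (what is proved, stated in full; the proofs are below) =====
def Claim_equal_find_and_remove : Prop := ∀ (dct : List (String × List (String × String))), Dom_find_and_remove dct → Spec_find_and_remove dct (find_and_remove dct)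

-- ===== LEMMAS AND PROOFS =====

-- proof-side helpers: the per-inner-dict effect of A's two phases
def pvStepD (mk : String) (d : PySem.Dict String (PySem.Dict String (String ⊕ Int)))
    (q : String × (String ⊕ Int)) : PySem.Dict String (PySem.Dict String (String ⊕ Int)) :=
  match q.2 with
  | Sum.inl v =>
      if PySem.Str.strIsdigit v then
        d.insert mk ((d.getD mk PySem.Dict.empty).insert q.1 (Sum.inr (pvToInt v)))
      else d
  | Sum.inr _ => d

def pvUpd (i : PySem.Dict String (String ⊕ Int)) (q : String × (String ⊕ Int)) :
    PySem.Dict String (String ⊕ Int) :=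
  match q.2 with
  | Sum.inl v => if PySem.Str.strIsdigit v then i.insert q.1 (Sum.inr (pvToInt v)) else i
  | Sum.inr _ => i

def pvF (i : PySem.Dict String (String ⊕ Int)) : PySem.Dict String (String ⊕ Int) :=
  i.items.foldl pvUpd i

def pvBadKeysL (xs : List (String × (String ⊕ Int))) : List String :=
  xs.filterMap (fun q => match q.2 with
    | Sum.inl v => if PySem.Str.strIsdigit v then none else some q.1
    | Sum.inr _ => none)

theorem pv_find?_mem_nodup {α : Type} (l : List (String × α)) (k : String) (v : α)
    (hn : (l.map Prod.fst).Nodup) (hm : (k, v) ∈ l) :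
    l.find? (fun q => q.1 == k) = some (k, v) := by
  induction l with
  | nil => simp at hm
  | cons a l ih =>
    simp only [List.map_cons, List.nodup_cons] at hn
    rcases List.mem_cons.mp hm with h | h
    · subst h; simp
    · have hne : (a.1 == k) = false := by
        apply beq_false_of_ne
        intro he
        exact hn.1 (by rw [he]; exact List.mem_map_of_mem h)
      simp [List.find?_cons, hne, ih hn.2 h]

theorem pv_find?_filter {α : Type} (l : List (String × α)) (k j : String) (h : j ≠ k) :
    (l.filter (fun p => !(p.1 == k))).find? (fun p => p.1 == j)
      = l.find? (fun p => p.1 == j) := by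
  induction l with
  | nil => rfl
  | cons a l ih =>
    cases hbk : (a.1 == k) with
    | true =>
      have ha : a.1 = k := by simpa using hbk
      have hbj : (a.1 == j) = false := beq_false_of_ne (by rw [ha]; exact fun e => h e.symm)
      simp [List.filter_cons, hbk, hbj, ih]
    | false =>
      simp only [List.filter_cons, hbk, Bool.not_false, if_pos]
      cases hbj : (a.1 == j) with
      | true => simp [List.find?_cons, hbj]
      | false => simp [List.find?_cons, hbj, ih]

theorem pv_get?_erase {ν : Type} (d : PySem.Dict String ν) (k j : String) (h : j ≠ k) :
    (d.erase k).get? j = d.get? j := by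
  obtain ⟨l⟩ := d
  simp only [PySem.Dict.erase, PySem.Dict.get?]
  rw [pv_find?_filter l k j h]

theorem pv_keys_erase {ν : Type} (d : PySem.Dict String ν) (k : String) :
    (d.erase k).keys = d.keys.filter (fun x => !(x == k)) := by
  obtain ⟨l⟩ := d
  simp only [PySem.Dict.erase, PySem.Dict.keys]
  rw [List.filter_map]
  rfl

theorem pv_eraseFold_keys {ν : Type} (ks : List String) (d : PySem.Dict String ν) :
    (ks.foldl PySem.Dict.erase d).keys = d.keys.filter (fun x => !(ks.contains x)) := by
  induction ks generalizing d with
  | nil => simp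
  | cons k ks ih =>
    rw [List.foldl_cons, ih, pv_keys_erase, List.filter_filter]
    apply List.filter_congr
    intro x _
    by_cases hxk : x = k <;> by_cases hxs : x ∈ ks <;> simp [hxk, hxs]

theorem pv_eraseFold_get? {ν : Type} (ks : List String) (d : PySem.Dict String ν) (j : String)
    (h : j ∉ ks) : (ks.foldl PySem.Dict.erase d).get? j = d.get? j := by
  revert h
  induction ks generalizing d with
  | nil => intro _; rfl
  | cons k ks ih =>
    intro h
    rw [List.foldl_cons, ih (d.erase k) (fun hm => h (List.mem_cons_of_mem _ hm)),
      pv_get?_erase d k j (fun he => h (he ▸ List.mem_cons_self))]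

theorem pv_insert_getD_self {ν : Type} (d : PySem.Dict String ν) (k : String) (v0 : ν)
    (hk : k ∈ d.keys) (hn : d.keys.Nodup) : d.insert k (d.getD k v0) = d := by
  have hc : d.contains k = true := (PySem.Dict.contains_iff_mem_keys d k).mpr hk
  apply PySem.Dict.ext
  rw [PySem.Dict.items_insert_of_contains _ _ hc]
  have hpt : ∀ p ∈ d.items,
      (fun p : String × ν => if (p.1 == k) = true then (k, d.getD k v0) else p) p = p := by
    intro p hp
    by_cases hb : (p.1 == k) = true
    · have hpk : p.1 = k := by simpa using hb
      have hv : d.getD k v0 = p.2 := by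
        have hm : (k, p.2) ∈ d.items := by rw [← hpk]; exact hp
        exact PySem.Dict.getD_of_mem_items d hm hn v0
      show (if (p.1 == k) = true then (k, d.getD k v0) else p) = p
      rw [if_pos hb, hv, ← hpk]
    · show (if (p.1 == k) = true then (k, d.getD k v0) else p) = p
      rw [if_neg hb]
  rw [List.map_congr_left hpt]
  simp

theorem pv_val_unique {α : Type} (l : List (String × α)) (k : String) (v v' : α)
    (hn : (l.map Prod.fst).Nodup) (h1 : (k, v) ∈ l) (h2 : (k, v') ∈ l) : v = v' := by
  have := pv_find?_mem_nodup l k v hn h1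
  have := pv_find?_mem_nodup l k v' hn h2
  simp_all

-- phase 1, inner loop: the list accumulator and the dict evolve independently
theorem pv_step2_split (xs : List (String × (String ⊕ Int))) (mk : String)
    (st : PySem.Dict String (PySem.Dict String (String ⊕ Int)) × List (String × String)) :
    xs.foldl (pvStep2 mk) st
      = (xs.foldl (pvStepD mk) st.1, st.2 ++ (pvBadKeysL xs).map (fun k => (mk, k))) := by
  induction xs generalizing st with
  | nil => simp [pvBadKeysL]
  | cons q xs ih =>
    obtain ⟨qk, qv⟩ := q
    rw [List.foldl_cons, List.foldl_cons, ih]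
    cases qv with
    | inl v =>
      by_cases hd : PySem.Str.strIsdigit v = true
      · simp only [pvStep2, pvStepD, pvBadKeysL, List.filterMap_cons, hd]
        simp
      · simp only [pvStep2, pvStepD, pvBadKeysL, List.filterMap_cons, hd]
        simp
    | inr n =>
      simp only [pvStep2, pvStepD, pvBadKeysL, List.filterMap_cons]

-- phase 1, inner loop: the dict updates factor through the inner dict at mk
theorem pv_stepD_factor (xs : List (String × (String ⊕ Int)))
    (d : PySem.Dict String (PySem.Dict String (String ⊕ Int))) (mk : String)
    (hk : mk ∈ d.keys) (hn : d.keys.Nodup) :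
    xs.foldl (pvStepD mk) d
      = d.insert mk (xs.foldl pvUpd (d.getD mk PySem.Dict.empty)) := by
  induction xs generalizing d with
  | nil => exact (pv_insert_getD_self d mk PySem.Dict.empty hk hn).symm
  | cons q xs ih =>
    obtain ⟨qk, qv⟩ := q
    rw [List.foldl_cons, List.foldl_cons]
    cases qv with
    | inl v =>
      by_cases hd : PySem.Str.strIsdigit v = true
      · have hc : d.contains mk = true := (PySem.Dict.contains_iff_mem_keys d mk).mpr hk
        have hkeys : (d.insert mk ((d.getD mk PySem.Dict.empty).insert qk
            (Sum.inr (pvToInt v)))).keys = d.keys := PySem.Dict.keys_insert_of_contains _ _ hc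
        rw [show pvStepD mk d (qk, Sum.inl v) = d.insert mk ((d.getD mk PySem.Dict.empty).insert qk
            (Sum.inr (pvToInt v))) by simp only [pvStepD, hd]; simp]
        rw [ih _ (hkeys ▸ hk) (hkeys ▸ hn)]
        rw [PySem.Dict.getD_insert_self, PySem.Dict.insert_insert_self]
        rw [show pvUpd (d.getD mk PySem.Dict.empty) (qk, Sum.inl v)
            = (d.getD mk PySem.Dict.empty).insert qk (Sum.inr (pvToInt v)) by simp only [pvUpd, hd]; simp]
      · rw [show pvStepD mk d (qk, Sum.inl v) = d by simp only [pvStepD, hd]; simp,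
          show pvUpd (d.getD mk PySem.Dict.empty) (qk, Sum.inl v)
            = d.getD mk PySem.Dict.empty by simp only [pvUpd, hd]; simp, ih d hk hn]
    | inr n =>
      rw [show pvStepD mk d (qk, Sum.inr n) = d from rfl,
        show pvUpd (d.getD mk PySem.Dict.empty) (qk, Sum.inr n)
          = d.getD mk PySem.Dict.empty from rfl, ih d hk hn]

-- the value-conversion fold: keys unchanged, lookups described by find?
theorem pv_updFold (xs : List (String × (String ⊕ Int))) (i : PySem.Dict String (String ⊕ Int))
    (hx : (xs.map Prod.fst).Nodup) (hsub : ∀ q ∈ xs, q.1 ∈ i.keys) (hn : i.keys.Nodup) :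
    (xs.foldl pvUpd i).keys = i.keys ∧
    (∀ j v0, (xs.foldl pvUpd i).getD j v0
        = (match xs.find? (fun q => q.1 == j) with
           | some (_, Sum.inl v) =>
               if PySem.Str.strIsdigit v then Sum.inr (pvToInt v) else i.getD j v0
           | _ => i.getD j v0)) := by
  induction xs generalizing i with
  | nil => exact ⟨rfl, by intro j v0; simp⟩
  | cons q xs ih =>
    obtain ⟨qk, qv⟩ := q
    simp only [List.map_cons, List.nodup_cons] at hx
    have hqk : qk ∈ i.keys := hsub (qk, qv) List.mem_cons_self
    have hsub' : ∀ q ∈ xs, q.1 ∈ i.keys := fun q hq => hsub q (List.mem_cons_of_mem _ hq)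
    have hfn : ∀ j, qk = j → xs.find? (fun q => q.1 == j) = none := by
      intro j hj
      rw [List.find?_eq_none]
      intro a ha hpa
      exact hx.1 (by
        have : a.1 = qk := by rw [hj]; simpa using hpa
        rw [← this]; exact List.mem_map_of_mem ha)
    cases qv with
    | inr n =>
      rw [List.foldl_cons, show pvUpd i (qk, Sum.inr n) = i from rfl]
      obtain ⟨ihk, ihg⟩ := ih i hx.2 hsub' hn
      refine ⟨ihk, ?_⟩
      intro j v0
      rw [ihg j v0]
      by_cases hj : qk = j
      · rw [hfn j hj, List.find?_cons_of_pos (h := by simpa using hj)]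
      · rw [List.find?_cons_of_neg (h := by simpa using hj)]
    | inl v =>
      by_cases hd : PySem.Str.strIsdigit v = true
      · rw [List.foldl_cons, show pvUpd i (qk, Sum.inl v)
            = i.insert qk (Sum.inr (pvToInt v)) by simp only [pvUpd, hd]; simp]
        have hc : i.contains qk = true := (PySem.Dict.contains_iff_mem_keys i qk).mpr hqk
        have hk' : (i.insert qk (Sum.inr (pvToInt v))).keys = i.keys :=
          PySem.Dict.keys_insert_of_contains _ _ hc
        obtain ⟨ihk, ihg⟩ := ih (i.insert qk (Sum.inr (pvToInt v))) hx.2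
          (fun q hq => by rw [hk']; exact hsub' q hq) (by rw [hk']; exact hn)
        refine ⟨by rw [ihk, hk'], ?_⟩
        intro j v0
        rw [ihg j v0]
        by_cases hj : qk = j
        · rw [hfn j hj, List.find?_cons_of_pos (h := by simpa using hj)]
          subst hj
          show (i.insert qk (Sum.inr (pvToInt v))).getD qk v0
              = if PySem.Str.strIsdigit v = true then Sum.inr (pvToInt v) else i.getD qk v0
          rw [if_pos hd, PySem.Dict.getD_insert_self]
        · rw [List.find?_cons_of_neg (h := by simpa using hj)]
          have hgd : (i.insert qk (Sum.inr (pvToInt v))).getD j v0 = i.getD j v0 :=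
            PySem.Dict.getD_insert_of_ne (hne := fun e => hj e.symm) ..
          cases hf : xs.find? (fun q => q.1 == j) with
          | none => simp [hgd]
          | some a =>
            obtain ⟨ak, av⟩ := a
            cases av with
            | inl w => by_cases hw : PySem.Str.strIsdigit w = true <;> simp [hw, hgd]
            | inr m => simp [hgd]
      · rw [List.foldl_cons, show pvUpd i (qk, Sum.inl v) = i by simp only [pvUpd, hd]; simp]
        obtain ⟨ihk, ihg⟩ := ih i hx.2 hsub' hn
        refine ⟨ihk, ?_⟩
        intro j v0
        rw [ihg j v0]
        by_cases hj : qk = j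
        · rw [hfn j hj, List.find?_cons_of_pos (h := by simpa using hj)]
          subst hj
          show i.getD qk v0
              = if PySem.Str.strIsdigit v = true then Sum.inr (pvToInt v) else i.getD qk v0
          rw [if_neg hd]
        · rw [List.find?_cons_of_neg (h := by simpa using hj)]

-- phase 1, outer loop
theorem pv_phase1 (mks : List String)
    (d : PySem.Dict String (PySem.Dict String (String ⊕ Int))) (acc : List (String × String))
    (hnd : mks.Nodup) (hmem : ∀ mk ∈ mks, mk ∈ d.keys) (hn : d.keys.Nodup) :
    (mks.foldl pvStep1 (d, acc)).1.keys = d.keys ∧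
    (∀ j, (mks.foldl pvStep1 (d, acc)).1.getD j PySem.Dict.empty
        = if j ∈ mks then pvF (d.getD j PySem.Dict.empty) else d.getD j PySem.Dict.empty) ∧
    (mks.foldl pvStep1 (d, acc)).2
      = acc ++ mks.flatMap (fun mk =>
          (pvBadKeysL ((d.getD mk PySem.Dict.empty).items)).map (fun k => (mk, k))) := by
  induction mks generalizing d acc with
  | nil => exact ⟨rfl, by intro j; simp, by simp⟩
  | cons mk mks ih =>
    simp only [List.nodup_cons] at hnd
    have hmk : mk ∈ d.keys := hmem mk List.mem_cons_self
    have hc : d.contains mk = true := (PySem.Dict.contains_iff_mem_keys d mk).mpr hmk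
    rw [List.foldl_cons]
    have hstep : pvStep1 (d, acc) mk
        = (d.insert mk (pvF (d.getD mk PySem.Dict.empty)),
           acc ++ (pvBadKeysL ((d.getD mk PySem.Dict.empty).items)).map (fun k => (mk, k))) := by
      unfold pvStep1
      rw [pv_step2_split]
      rw [show ((d, acc) : PySem.Dict String (PySem.Dict String (String ⊕ Int))
          × List (String × String)).1 = d from rfl]
      rw [pv_stepD_factor _ _ _ hmk hn]
      rfl
    rw [hstep]
    have hk' : (d.insert mk (pvF (d.getD mk PySem.Dict.empty))).keys = d.keys :=
      PySem.Dict.keys_insert_of_contains _ _ hc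
    have hgd' : ∀ j', j' ≠ mk →
        (d.insert mk (pvF (d.getD mk PySem.Dict.empty))).getD j' PySem.Dict.empty
          = d.getD j' PySem.Dict.empty :=
      fun j' hne => PySem.Dict.getD_insert_of_ne (hne := hne) ..
    obtain ⟨ihk, ihg, ihs⟩ := ih (d.insert mk (pvF (d.getD mk PySem.Dict.empty)))
      (acc ++ (pvBadKeysL ((d.getD mk PySem.Dict.empty).items)).map (fun k => (mk, k)))
      hnd.2 (fun mk' hm => by rw [hk']; exact hmem mk' (List.mem_cons_of_mem _ hm))
      (by rw [hk']; exact hn)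
    refine ⟨by rw [ihk, hk'], ?_, ?_⟩
    · intro j
      rw [ihg j]
      by_cases h1 : j ∈ mks
      · have hne : j ≠ mk := fun e => hnd.1 (e ▸ h1)
        rw [if_pos h1, if_pos (List.mem_cons_of_mem _ h1), hgd' j hne]
      · by_cases h2 : j = mk
        · subst h2
          rw [if_neg h1, if_pos List.mem_cons_self, PySem.Dict.getD_insert_self]
        · rw [if_neg h1, if_neg (by simp [h1, h2]), hgd' j h2]
    · rw [ihs, List.flatMap_cons, ← List.append_assoc]
      congr 1
      rw [List.flatMap_def, List.flatMap_def]
      congr 1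
      apply List.map_congr_left
      intro mk' hm
      rw [hgd' mk' (fun e => hnd.1 (e ▸ hm))]

-- phase 2
theorem pv_phase2 (ps : List (String × String))
    (d : PySem.Dict String (PySem.Dict String (String ⊕ Int)))
    (hmem : ∀ p ∈ ps, p.1 ∈ d.keys) (hn : d.keys.Nodup) :
    (ps.foldl pvPop d).keys = d.keys ∧
    (∀ j, (ps.foldl pvPop d).getD j PySem.Dict.empty
        = ((ps.filter (fun p => p.1 == j)).map Prod.snd).foldl PySem.Dict.erase
            (d.getD j PySem.Dict.empty)) := by
  induction ps generalizing d with
  | nil => exact ⟨rfl, by intro j; simp⟩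
  | cons p ps ih =>
    have hp1 : p.1 ∈ d.keys := hmem p List.mem_cons_self
    have hc : d.contains p.1 = true := (PySem.Dict.contains_iff_mem_keys d p.1).mpr hp1
    rw [List.foldl_cons]
    have hk' : (pvPop d p).keys = d.keys := PySem.Dict.keys_insert_of_contains _ _ hc
    obtain ⟨ihk, ihg⟩ := ih (pvPop d p)
      (fun q hq => by rw [hk']; exact hmem q (List.mem_cons_of_mem _ hq))
      (by rw [hk']; exact hn)
    refine ⟨by rw [ihk, hk'], ?_⟩
    intro j
    rw [ihg j, List.filter_cons]
    by_cases hj : p.1 = j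
    · rw [if_pos (by simpa using hj), List.map_cons, List.foldl_cons]
      congr 1
      unfold pvPop
      subst hj
      rw [PySem.Dict.getD_insert_self]
    · rw [if_neg (by simpa using hj)]
      congr 1
      exact PySem.Dict.getD_insert_of_ne (hne := fun e => hj e.symm) ..

-- filtering the collected pair list down to one main key
theorem pv_filter_flatMap (mks : List String) (j : String) (hnd : mks.Nodup) (hj : j ∈ mks)
    (g : String → List String) :
    ((mks.flatMap (fun mk => (g mk).map (fun k => (mk, k)))).filter
        (fun p => p.1 == j)).map Prod.snd = g j := by
  induction mks with
  | nil => simp at hj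
  | cons mk mks ih =>
    simp only [List.nodup_cons] at hnd
    rw [List.flatMap_cons, List.filter_append, List.map_append]
    by_cases he : mk = j
    · subst he
      have hrest : (mks.flatMap (fun mk' => (g mk').map (fun k => (mk', k)))).filter
          (fun p => p.1 == mk) = [] := by
        rw [List.filter_eq_nil_iff]
        intro a ha
        obtain ⟨mk', hmk', hb⟩ := List.mem_flatMap.mp ha
        obtain ⟨k, _, hk⟩ := List.mem_map.mp hb
        have : a.1 = mk' := by rw [← hk]
        simp [this]
        exact fun e => hnd.1 (e ▸ hmk')
      rw [hrest, List.map_nil, List.append_nil]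
      rw [List.filter_map, List.map_map]
      have : ((fun p : String × String => p.1 == mk) ∘ fun k => (mk, k)) = fun _ => true := by
        funext k; simp
      rw [this, List.filter_true]
      simp [Function.comp]
    · have hhead : ((g mk).map (fun k => (mk, k))).filter (fun p => p.1 == j) = [] := by
        rw [List.filter_eq_nil_iff]
        intro a ha
        obtain ⟨k, _, hk⟩ := List.mem_map.mp ha
        have : a.1 = mk := by rw [← hk]
        simp [this, he]
      rw [hhead, List.map_nil, List.nil_append]
      exact ih hnd.2 (List.mem_cons.mp hj |>.resolve_left (fun e => he e.symm))

theorem pv_filterMap_if {α β : Type} (l : List α) (p : α → Bool) (f : α → β) :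
    l.filterMap (fun q => if p q then some (f q) else none) = (l.filter p).map f := by
  induction l with
  | nil => rfl
  | cons a l ih =>
    by_cases hp : p a <;> simp [List.filterMap_cons, List.filter_cons, hp, ih]

-- the per-inner-dict correctness: phase-1 conversion then erasing the bad keys
-- equals B's filtering comprehension
theorem pv_inner_main (w : PySem.Dict String String) (hn : w.keys.Nodup) :
    ((pvBadKeysL ((pvInner w).items)).foldl PySem.Dict.erase
        (pvF (pvInner w))).items.map (fun q => (q.1, (q.2.getRight?).getD 0))
      = w.items.filterMap (fun q =>
          if PySem.Str.strIsdigit q.2 then some (q.1, pvToInt q.2) else none) := by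
  have hnf : (w.items.map Prod.fst).Nodup := hn
  have hi0items : (pvInner w).items = w.items.map (fun q => (q.1, Sum.inl q.2)) := rfl
  have hi0keys : (pvInner w).keys = w.keys := by
    simp [pvInner, PySem.Dict.keys]
  have hn0 : (pvInner w).keys.Nodup := by rw [hi0keys]; exact hn
  have hxnod : (((pvInner w).items).map Prod.fst).Nodup := hn0
  have hsub : ∀ q ∈ (pvInner w).items, q.1 ∈ (pvInner w).keys :=
    fun q hq => List.mem_map_of_mem (f := fun x => x.1) hq
  obtain ⟨hk1, hg1⟩ := pv_updFold ((pvInner w).items) (pvInner w) hxnod hsub hn0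
  have hbk_mem : ∀ x, x ∈ pvBadKeysL ((pvInner w).items)
      ↔ ∃ q ∈ w.items, (if PySem.Str.strIsdigit q.2 = true then none else some q.1) = some x := by
    intro x
    simp only [pvBadKeysL, hi0items, List.filterMap_map, List.mem_filterMap]
    exact Iff.rfl
  have hnotbad : ∀ q ∈ w.items, PySem.Str.strIsdigit q.2 = true
      → q.1 ∉ pvBadKeysL ((pvInner w).items) := by
    intro q hq hd hmem
    obtain ⟨q', hq', hs⟩ := (hbk_mem q.1).mp hmem
    by_cases hd' : PySem.Str.strIsdigit q'.2 = true
    · rw [if_pos hd'] at hs; cases hs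
    · rw [if_neg hd'] at hs
      have he1 : q'.1 = q.1 := Option.some.inj hs
      have he2 : q'.2 = q.2 := by
        apply pv_val_unique w.items q.1 q'.2 q.2 hnf
        · rw [← he1]; exact hq'
        · exact hq
      rw [he2] at hd'; exact hd' hd
  have hbad : ∀ q ∈ w.items, PySem.Str.strIsdigit q.2 = false
      → q.1 ∈ pvBadKeysL ((pvInner w).items) := by
    intro q hq hd
    exact (hbk_mem q.1).mpr ⟨q, hq, by rw [if_neg (by rw [hd]; simp)]⟩
  have hk2 : ((pvBadKeysL ((pvInner w).items)).foldl PySem.Dict.erase (pvF (pvInner w))).keys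
      = w.keys.filter (fun x => !((pvBadKeysL ((pvInner w).items)).contains x)) := by
    rw [pv_eraseFold_keys]
    rw [show (pvF (pvInner w)).keys = w.keys from by
      rw [show pvF (pvInner w) = List.foldl pvUpd (pvInner w) (pvInner w).items from rfl,
        hk1, hi0keys]]
  have hn2 : ((pvBadKeysL ((pvInner w).items)).foldl PySem.Dict.erase (pvF (pvInner w))).keys.Nodup := by
    rw [hk2]; exact hn.filter _
  rw [PySem.Dict.items_eq_map_keys _ hn2 (Sum.inl ""), hk2]
  rw [show w.keys = w.items.map (fun x => x.1) from rfl, List.filter_map]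
  have hfc : w.items.filter ((fun x => !((pvBadKeysL ((pvInner w).items)).contains x))
        ∘ (fun x : String × String => x.1))
      = w.items.filter (fun q => PySem.Str.strIsdigit q.2) := by
    apply List.filter_congr
    intro q hq
    show (!((pvBadKeysL ((pvInner w).items)).contains q.1)) = PySem.Str.strIsdigit q.2
    cases hd : PySem.Str.strIsdigit q.2 with
    | true => simp [hnotbad q hq hd]
    | false => simp [hbad q hq hd]
  rw [hfc, List.map_map, List.map_map]
  rw [pv_filterMap_if w.items (fun q => PySem.Str.strIsdigit q.2) (fun q => (q.1, pvToInt q.2))]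
  apply List.map_congr_left
  intro q hq
  have hq1 : q ∈ w.items := (List.mem_filter.mp hq).1
  have hd : PySem.Str.strIsdigit q.2 = true := by simpa using (List.mem_filter.mp hq).2
  show (q.1, (((pvBadKeysL ((pvInner w).items)).foldl PySem.Dict.erase
      (pvF (pvInner w))).getD q.1 (Sum.inl "")).getRight?.getD 0) = (q.1, pvToInt q.2)
  have hget : ((pvBadKeysL ((pvInner w).items)).foldl PySem.Dict.erase
      (pvF (pvInner w))).get? q.1 = (pvF (pvInner w)).get? q.1 :=
    pv_eraseFold_get? _ _ q.1 (hnotbad q hq1 hd)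
  rw [PySem.Dict.getD_eq_get?_getD, hget, ← PySem.Dict.getD_eq_get?_getD]
  rw [show pvF (pvInner w) = ((pvInner w).items).foldl pvUpd (pvInner w) from rfl]
  rw [hg1 q.1 (Sum.inl "")]
  have hfind : ((pvInner w).items).find? (fun r => r.1 == q.1)
      = some (q.1, Sum.inl q.2) := by
    rw [hi0items, List.find?_map]
    rw [show ((fun r : String × (String ⊕ Int) => r.1 == q.1)
        ∘ (fun q : String × String => (q.1, Sum.inl q.2)))
        = (fun r : String × String => r.1 == q.1) from rfl]
    rw [pv_find?_mem_nodup w.items q.1 q.2 hnf hq1]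
    rfl
  rw [hfind]
  show (q.1, (if PySem.Str.strIsdigit q.2 = true then Sum.inr (pvToInt q.2)
      else (pvInner w).getD q.1 (Sum.inl "")).getRight?.getD 0) = (q.1, pvToInt q.2)
  rw [if_pos hd]
  rfl

theorem pv_marshal_inner_nodup (dct : List (String × List (String × String)))
    (p : String × PySem.Dict String String) (hp : p ∈ (pvMarshal dct).items) :
    p.2.keys.Nodup := by
  have hv : ∀ (l : List (String × PySem.Dict String String))
      (d : PySem.Dict String (PySem.Dict String String)) (w : PySem.Dict String String),
      w ∈ (l.foldl (fun acc p => acc.insert p.1 p.2) d).values →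
      w ∈ d.values ∨ ∃ q ∈ l, w = q.2 := by
    intro l
    induction l with
    | nil => intro d w h; exact Or.inl h
    | cons a l ih =>
      intro d w h
      rw [List.foldl_cons] at h
      rcases ih _ w h with h' | h'
      · rcases PySem.Dict.mem_values_insert _ _ _ _ h' with h'' | h''
        · exact Or.inr ⟨a, List.mem_cons_self, h''⟩
        · exact Or.inl h''
      · obtain ⟨q, hq, hw⟩ := h'
        exact Or.inr ⟨q, List.mem_cons_of_mem _ hq, hw⟩
  have hpv : p.2 ∈ (pvMarshal dct).values :=
    List.mem_map_of_mem (f := Prod.snd) hp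
  rcases hv _ _ _ hpv with h | h
  · simp [PySem.Dict.empty, PySem.Dict.values] at h
  · obtain ⟨q, hq, hw⟩ := h
    obtain ⟨r, _, hr⟩ := List.mem_map.mp hq
    have : p.2 = PySem.Dict.ofList r.2 := by rw [hw, ← hr]
    rw [this]
    exact PySem.Dict.nodup_keys_ofList _

theorem pv_main (dct : List (String × List (String × String))) :
    find_and_remove dct = find_and_remove_alt dct := by
  unfold find_and_remove find_and_remove_alt
  dsimp only
  have hnd0 : ((pvMarshal dct).keys).Nodup := PySem.Dict.nodup_keys_ofList _
  set dA := PySem.Dict.mk ((pvMarshal dct).items.map (fun p => (p.1, pvInner p.2))) with hdA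
  have hAkeys : dA.keys = (pvMarshal dct).keys := by
    simp [hdA, PySem.Dict.keys]
  have hAnd : dA.keys.Nodup := by rw [hAkeys]; exact hnd0
  obtain ⟨h1k, h1g, h1s⟩ := pv_phase1 dA.keys dA [] hAnd (fun mk hm => hm) hAnd
  set st := dA.keys.foldl pvStep1 (dA, ([] : List (String × String))) with hst
  have hmem2 : ∀ p ∈ st.2, p.1 ∈ st.1.keys := by
    intro p hp
    rw [h1s, List.nil_append] at hp
    obtain ⟨mk, hmk, hb⟩ := List.mem_flatMap.mp hp
    obtain ⟨k, _, hk⟩ := List.mem_map.mp hb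
    rw [h1k]
    rw [show p.1 = mk from by rw [← hk]]
    exact hmk
  obtain ⟨h2k, h2g⟩ := pv_phase2 st.2 st.1 hmem2 (by rw [h1k]; exact hAnd)
  set d2 := st.2.foldl pvPop st.1 with hd2
  have hd2keys : d2.keys = dA.keys := by rw [hd2, h2k, h1k]
  have hnd2 : d2.keys.Nodup := by rw [hd2keys]; exact hAnd
  rw [PySem.Dict.items_eq_map_keys d2 hnd2 PySem.Dict.empty]
  rw [hd2keys, hAkeys,
    show (pvMarshal dct).keys = (pvMarshal dct).items.map (fun x => x.1) from rfl]
  rw [List.map_map, List.map_map]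
  apply List.map_congr_left
  intro p hp
  have hpk : p.1 ∈ dA.keys := by
    rw [hAkeys]
    exact List.mem_map_of_mem (f := fun x => x.1) hp
  have hAget : dA.getD p.1 PySem.Dict.empty = pvInner p.2 := by
    apply PySem.Dict.getD_of_mem_items dA ?_ hAnd
    exact List.mem_map_of_mem (f := fun p => (p.1, pvInner p.2)) hp
  have hstget : st.1.getD p.1 PySem.Dict.empty = pvF (pvInner p.2) := by
    rw [hst, h1g p.1, if_pos hpk, hAget]
  have hfilter : (st.2.filter (fun q => q.1 == p.1)).map Prod.snd
      = pvBadKeysL ((pvInner p.2).items) := by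
    rw [h1s, List.nil_append]
    rw [pv_filter_flatMap dA.keys p.1 hAnd hpk
      (fun mk => pvBadKeysL ((dA.getD mk PySem.Dict.empty).items))]
    rw [hAget]
  have hd2get : d2.getD p.1 PySem.Dict.empty
      = (pvBadKeysL ((pvInner p.2).items)).foldl PySem.Dict.erase (pvF (pvInner p.2)) := by
    rw [hd2, h2g p.1, hfilter, hstget]
  exact congrArg (fun z => (p.1, z))
    (by dsimp only; rw [hd2get]; exact pv_inner_main p.2 (pv_marshal_inner_nodup dct p hp))

-- ===== VERDICT (by name: the statement is the Claim_ definition above) =====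
theorem find_and_remove_spec : Claim_equal_find_and_remove := by
  intro dct _
  exact pv_main dct
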